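-- pv_equiv track=rewrite | github.com/Fear-Hungry/Job-Shop-Problem | src/nsga2/utils.py | find_critical_blocks
-- ===== SOURCE A (Python) =====
-- def find_critical_blocks(critical_path):
--     if not critical_path:
--         return []
--     blocks = []
--     current_block = [critical_path[0]]
--     current_machine = critical_path[0][2]
--     for i in range(1, len(critical_path)):
--         op = critical_path[i]
--         if op[2] == current_machine:
--             current_block.append(op)
--         else:
--             if len(current_block) > 1:
--                 blocks.append(current_block)
--             current_block = [op]
--             current_machine = op[2]
--     if len(current_block) > 1:
--         blocks.append(current_block)
--     return blocks
-- ===== SOURCE B (Python) =====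
-- def find_critical_blocks(critical_path):
--     # Phase 1: split the path into maximal runs of equal machine using two indices
--     # and slicing; Phase 2: keep only runs longer than 1.
--     runs = []
--     i, n = 0, len(critical_path)
--     while i < n:
--         m = critical_path[i][2]
--         j = i + 1
--         while j < n and critical_path[j][2] == m:
--             j += 1
--         runs.append(critical_path[i:j])
--         i = j
--     return [r for r in runs if len(r) > 1]
-- ===== Notes on version B (the rewrite author's own statement) =====
-- stated objective: idiomatic
-- what changed: Replaces A's one-pass state machine (current_block/current_machine with flush-on-change and a trailing flush) by a group-then-filter decomposition: first split the path into maximal same-machine runs with a two-index scan and slicing, then keep the runs of length > 1.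
import Mathlib
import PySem

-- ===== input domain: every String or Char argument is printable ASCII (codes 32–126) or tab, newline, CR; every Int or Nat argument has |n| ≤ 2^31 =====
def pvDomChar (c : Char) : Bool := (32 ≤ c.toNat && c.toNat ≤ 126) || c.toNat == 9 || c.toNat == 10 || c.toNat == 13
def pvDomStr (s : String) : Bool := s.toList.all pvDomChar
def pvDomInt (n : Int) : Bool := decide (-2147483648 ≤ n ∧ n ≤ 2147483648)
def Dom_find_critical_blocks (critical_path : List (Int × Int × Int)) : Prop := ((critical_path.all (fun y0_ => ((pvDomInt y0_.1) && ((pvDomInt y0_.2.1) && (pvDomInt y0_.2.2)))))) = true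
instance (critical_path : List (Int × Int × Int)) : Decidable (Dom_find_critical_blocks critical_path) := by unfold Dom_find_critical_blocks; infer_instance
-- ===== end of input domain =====

-- B replaces A's state machine (current_block/current_machine with flush-on-change)
-- by a group-then-filter decomposition: split into maximal same-machine runs, keep runs of length > 1.


-- ===== PORT A =====
def stepA (st : List (List (Int × Int × Int)) × List (Int × Int × Int) × Int)
    (op : Int × Int × Int) : List (List (Int × Int × Int)) × List (Int × Int × Int) × Int :=
  if op.2.2 == st.2.2 then (st.1, st.2.1 ++ [op], st.2.2)
  else ((if st.2.1.length > 1 then st.1 ++ [st.2.1] else st.1), [op], op.2.2)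

def find_critical_blocks (critical_path : List (Int × Int × Int)) : List (List (Int × Int × Int)) :=
  match critical_path with
  | [] => []
  | x :: rest =>
      let st := rest.foldl stepA ([], [x], x.2.2)
      if st.2.1.length > 1 then st.1 ++ [st.2.1] else st.1

-- ===== PORT B =====
-- Split into maximal runs of equal machine (inner index scan + slice in Source B
-- = takeWhile/dropWhile on the tail), then filter runs of length > 1.
def runsB : List (Int × Int × Int) → List (List (Int × Int × Int))
  | [] => []
  | x :: xs =>
      (x :: xs.takeWhile (fun op => op.2.2 == x.2.2)) ::
        runsB (xs.dropWhile (fun op => op.2.2 == x.2.2))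
  termination_by l => l.length
  decreasing_by
    simpa using Nat.lt_succ_of_le (List.length_dropWhile_le _ _)

def find_critical_blocks_alt (critical_path : List (Int × Int × Int)) : List (List (Int × Int × Int)) :=
  (runsB critical_path).filter (fun r => decide (r.length > 1))

-- ===== PRECONDITION & SPEC =====
def Spec_find_critical_blocks (critical_path : List (Int × Int × Int)) (out : List (List (Int × Int × Int))) : Prop := out = find_critical_blocks_alt critical_path
instance (critical_path : List (Int × Int × Int)) (out : List (List (Int × Int × Int))) : Decidable (Spec_find_critical_blocks critical_path out) := by unfold Spec_find_critical_blocks; infer_instance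

-- ===== CLAIM (what is proved, stated in full; the proofs are below) =====
def Claim_equal_find_critical_blocks : Prop := ∀ (critical_path : List (Int × Int × Int)), Dom_find_critical_blocks critical_path → Spec_find_critical_blocks critical_path (find_critical_blocks critical_path)

-- ===== LEMMAS AND PROOFS =====
@[simp] lemma runsB_nil : runsB [] = [] := by simp [runsB]

lemma runsB_cons (x : Int × Int × Int) (xs : List (Int × Int × Int)) :
    runsB (x :: xs) =
      (x :: xs.takeWhile (fun op => op.2.2 == x.2.2)) ::
        runsB (xs.dropWhile (fun op => op.2.2 == x.2.2)) := by
  simp [runsB]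

lemma loop_eq (xs : List (Int × Int × Int)) :
    ∀ (blocks : List (List (Int × Int × Int))) (cur : List (Int × Int × Int)) (m : Int),
      (let st := xs.foldl stepA (blocks, cur, m);
       if st.2.1.length > 1 then st.1 ++ [st.2.1] else st.1)
      = blocks ++
        (((cur ++ xs.takeWhile (fun op => op.2.2 == m)) ::
            runsB (xs.dropWhile (fun op => op.2.2 == m))).filter
          (fun r => decide (r.length > 1))) := by
  induction xs with
  | nil =>
      intro blocks cur m
      by_cases hc : cur.length > 1 <;>
        simp [hc]
  | cons x xs ih =>
      intro blocks cur m
      cases hb : (x.2.2 == m) with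
      | true =>
          simp only [List.foldl_cons, stepA, hb, reduceIte, List.takeWhile_cons,
            List.dropWhile_cons]
          rw [ih blocks (cur ++ [x]) m]
          simp [List.append_assoc]
      | false =>
          simp only [List.foldl_cons, stepA, hb, Bool.false_eq_true, reduceIte,
            List.takeWhile_cons, List.dropWhile_cons]
          rw [ih (if cur.length > 1 then blocks ++ [cur] else blocks) [x] x.2.2]
          rw [runsB_cons]
          by_cases hc : cur.length > 1 <;>
            simp [List.filter_cons, hc]

-- ===== VERDICT (by name: the statement is the Claim_ definition above) =====
theorem find_critical_blocks_spec : Claim_equal_find_critical_blocks := by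
  intro cp _
  unfold Spec_find_critical_blocks
  cases cp with
  | nil => simp [find_critical_blocks, find_critical_blocks_alt]
  | cons x rest =>
      show find_critical_blocks (x :: rest) = _
      simp only [find_critical_blocks]
      rw [loop_eq rest [] [x] x.2.2]
      simp [find_critical_blocks_alt, runsB_cons]
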